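-- pv_equiv track=rewrite | github.com/pypi-data/pypi-mirror-391 | packages/yangsuite-coverage/yangsuite_coverage-3.0.18.post0.dev7-py3-none-any.whl/yscoverage/precommit.py | remove_excluded_xpaths
-- ===== SOURCE A (Python) =====
-- def remove_excluded_xpaths(trim_missing_tc,
--                            modelname,
--                            excluded_xpaths):
--     """Remove exception xpaths from missing test cases.
--        Check a missing test case against the exclusion list.
--
--     Args:
--         trim_missing_tc (set): missing test cases
--         modelname (str): model name
--         excluded_xpaths(list): excluded xpaths
--
--     Return:
--         (set): A set of trim missing test paths
--     """
--     trim_exception_tc = set()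
--     final_set = set()
--     for xpath in excluded_xpaths:
--         for missing_tc in trim_missing_tc:
--             if missing_tc.startswith(xpath):
--                 trim_exception_tc.add(missing_tc)
--     final_set = trim_missing_tc - trim_exception_tc
--     return final_set
-- ===== SOURCE B (Python) =====
-- def remove_excluded_xpaths(trim_missing_tc,
--                            modelname,
--                            excluded_xpaths):
--     """Single-pass filter: keep the test cases no excluded xpath prefixes."""
--     return {tc for tc in trim_missing_tc
--             if not any(tc.startswith(xp) for xp in excluded_xpaths)}
-- ===== Notes on version B (the rewrite author's own statement) =====
-- stated objective: idiomatic
-- what changed: Replaces the nested loops that accumulate an exception set plus a final set difference with one direct set-comprehension filter that short-circuits via any() over the excluded prefixes.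
import Mathlib
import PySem

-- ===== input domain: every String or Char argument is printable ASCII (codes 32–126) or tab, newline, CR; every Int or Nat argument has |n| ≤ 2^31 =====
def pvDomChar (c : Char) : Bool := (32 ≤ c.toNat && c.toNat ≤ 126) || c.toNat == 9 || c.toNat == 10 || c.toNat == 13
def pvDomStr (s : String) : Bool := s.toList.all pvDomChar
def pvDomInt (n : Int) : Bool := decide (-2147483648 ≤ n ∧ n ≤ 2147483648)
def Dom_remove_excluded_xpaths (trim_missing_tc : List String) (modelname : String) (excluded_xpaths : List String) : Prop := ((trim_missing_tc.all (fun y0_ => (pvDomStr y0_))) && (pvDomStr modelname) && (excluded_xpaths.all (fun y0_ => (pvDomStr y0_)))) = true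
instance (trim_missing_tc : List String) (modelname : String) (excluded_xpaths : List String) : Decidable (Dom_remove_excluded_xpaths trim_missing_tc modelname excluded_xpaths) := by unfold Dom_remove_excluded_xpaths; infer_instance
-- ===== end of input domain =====

-- ===== PORT A =====
-- B replaces A's nested exception-set accumulation + set difference with one direct
-- set-comprehension filter (objective: idiomatic); return-value equivalence only.
def remove_excluded_xpaths (trim_missing_tc : List String) (modelname : String) (excluded_xpaths : List String) : List String :=
  let trim_exception_tc : PySem.Set String :=
    excluded_xpaths.foldl (fun s xpath =>
      trim_missing_tc.foldl (fun s missing_tc =>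
        if PySem.Str.startswith missing_tc xpath then PySem.Set.add s missing_tc else s) s)
      PySem.Set.empty
  PySem.Set.diff trim_missing_tc trim_exception_tc

-- ===== PORT B =====
def remove_excluded_xpaths_alt (trim_missing_tc : List String) (modelname : String) (excluded_xpaths : List String) : List String :=
  PySem.Set.ofList (trim_missing_tc.filter (fun tc =>
    !(excluded_xpaths.any (fun xp => PySem.Str.startswith tc xp))))

-- ===== PRECONDITION & SPEC =====
-- trim_missing_tc is a Python set: Pre_ restricts its list model to distinct elements.
def Pre_remove_excluded_xpaths (trim_missing_tc : List String) (modelname : String) (excluded_xpaths : List String) : Prop :=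
  trim_missing_tc.Nodup
instance (trim_missing_tc : List String) (modelname : String) (excluded_xpaths : List String) : Decidable (Pre_remove_excluded_xpaths trim_missing_tc modelname excluded_xpaths) := by unfold Pre_remove_excluded_xpaths; infer_instance
def pvWitness_remove_excluded_xpaths : List String × String × List String :=
  (["/a/b", "/a/c", "/d"], "m", ["/a/b", "/x"])

def Spec_remove_excluded_xpaths (trim_missing_tc : List String) (modelname : String) (excluded_xpaths : List String) (out : List String) : Prop := out = remove_excluded_xpaths_alt trim_missing_tc modelname excluded_xpaths
instance (trim_missing_tc : List String) (modelname : String) (excluded_xpaths : List String) (out : List String) : Decidable (Spec_remove_excluded_xpaths trim_missing_tc modelname excluded_xpaths out) := by unfold Spec_remove_excluded_xpaths; infer_instance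

-- ===== CLAIM (what is proved, stated in full; the proofs are below) =====
def Claim_equal_remove_excluded_xpaths : Prop := ∀ (trim_missing_tc : List String) (modelname : String) (excluded_xpaths : List String), Dom_remove_excluded_xpaths trim_missing_tc modelname excluded_xpaths → Pre_remove_excluded_xpaths trim_missing_tc modelname excluded_xpaths → Spec_remove_excluded_xpaths trim_missing_tc modelname excluded_xpaths (remove_excluded_xpaths trim_missing_tc modelname excluded_xpaths)

-- ===== LEMMAS AND PROOFS =====

theorem pv_mem_foldl_addIf (p : String → Bool) (trim : List String) (s : List String) (x : String) :
    x ∈ trim.foldl (fun s tc => if p tc then PySem.Set.add s tc else s) s ↔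
      x ∈ s ∨ (x ∈ trim ∧ p x = true) := by
  induction trim generalizing s with
  | nil => simp
  | cons hd tl ih =>
    simp only [List.foldl_cons, List.mem_cons, ih]
    by_cases h : p hd = true
    · simp [h, PySem.Set.mem_add]
      constructor
      · rintro ((hs | rfl) | h2)
        · exact Or.inl hs
        · exact Or.inr ⟨Or.inl rfl, h⟩
        · exact Or.inr ⟨Or.inr h2.1, h2.2⟩
      · rintro (hs | ⟨rfl | hm, hp⟩)
        · exact Or.inl (Or.inl hs)
        · exact Or.inl (Or.inr rfl)
        · exact Or.inr ⟨hm, hp⟩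
    · simp only [h]
      constructor
      · rintro (hs | h2)
        · exact Or.inl hs
        · exact Or.inr ⟨Or.inr h2.1, h2.2⟩
      · rintro (hs | ⟨rfl | hm, hp⟩)
        · exact Or.inl hs
        · exact absurd hp h
        · exact Or.inr ⟨hm, hp⟩

theorem pv_mem_exception (trim excluded : List String) (s : List String) (x : String) :
    x ∈ excluded.foldl (fun s xpath =>
        trim.foldl (fun s tc => if PySem.Str.startswith tc xpath then PySem.Set.add s tc else s) s) s ↔
      x ∈ s ∨ (x ∈ trim ∧ ∃ xp ∈ excluded, PySem.Str.startswith x xp = true) := by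
  induction excluded generalizing s with
  | nil => simp
  | cons hd tl ih =>
    simp only [List.foldl_cons, ih, pv_mem_foldl_addIf, List.mem_cons]
    constructor
    · rintro ((hs | ⟨hm, hp⟩) | ⟨hm, xp, hxp, hp⟩)
      · exact Or.inl hs
      · exact Or.inr ⟨hm, hd, Or.inl rfl, hp⟩
      · exact Or.inr ⟨hm, xp, Or.inr hxp, hp⟩
    · rintro (hs | ⟨hm, xp, (rfl | hxp), hp⟩)
      · exact Or.inl (Or.inl hs)
      · exact Or.inl (Or.inr ⟨hm, hp⟩)
      · exact Or.inr ⟨hm, xp, hxp, hp⟩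


-- ===== VERDICT (by name: the statement is the Claim_ definition above) =====
theorem remove_excluded_xpaths_spec : Claim_equal_remove_excluded_xpaths := by
  intro trim modelname excluded _ hpre
  unfold Spec_remove_excluded_xpaths remove_excluded_xpaths remove_excluded_xpaths_alt
  have hnd : (trim.filter (fun tc => !excluded.any fun xp => PySem.Str.startswith tc xp)).Nodup :=
    List.Nodup.filter _ hpre
  rw [show (PySem.Set.ofList (trim.filter (fun tc => !excluded.any fun xp => PySem.Str.startswith tc xp)))
        = trim.filter (fun tc => !excluded.any fun xp => PySem.Str.startswith tc xp)
      from PySem.Set.ofList_eq_self_of_nodup _ hnd]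
  show trim.filter _ = trim.filter _
  apply List.filter_congr
  intro x hx
  have h : PySem.Set.contains
      (excluded.foldl (fun s xpath =>
        trim.foldl (fun s tc => if PySem.Str.startswith tc xpath then PySem.Set.add s tc else s) s)
        PySem.Set.empty) x
      = excluded.any (fun xp => PySem.Str.startswith x xp) := by
    rw [Bool.eq_iff_iff, PySem.Set.contains_iff, pv_mem_exception, List.any_eq_true]
    simp [PySem.Set.empty, hx]
  rw [h]
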